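-- pv_equiv track=rewrite | github.com/AkashSri28/Leetcode-Solved-Questions | 0564-find-the-closest-palindrome/0564-find-the-closest-palindrome.py | half_to_palindrome
-- ===== SOURCE A (Python) =====
-- def half_to_palindrome(tmp, is_even):
--     rev = tmp
--     if not is_even:
--         tmp //= 10
--
--     while tmp > 0:
--         rev = rev*10 + tmp%10
--         tmp //= 10
--
--     return rev
-- ===== SOURCE B (Python) =====
-- def half_to_palindrome(tmp, is_even):
--     t = tmp if is_even else tmp // 10
--
--     def mirror(t):
--         # returns (value of t's digits reversed, 10 ** number_of_digits(t)); (0, 1) for t <= 0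
--         if t <= 0:
--             return (0, 1)
--         r, p = mirror(t // 10)
--         return (r + (t % 10) * p, 10 * p)
--
--     r, p = mirror(t)
--     return tmp * p + r
-- ===== Notes on version B (the rewrite author's own statement) =====
-- stated objective: alternative
-- what changed: Replaces A's top-down while-loop that mutates an accumulator rev digit by digit with a bottom-up recursion computing the pair (reversed-digit value, 10**digit_count) of the half, combined once by the closed formula tmp*p + r.
import Mathlib
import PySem

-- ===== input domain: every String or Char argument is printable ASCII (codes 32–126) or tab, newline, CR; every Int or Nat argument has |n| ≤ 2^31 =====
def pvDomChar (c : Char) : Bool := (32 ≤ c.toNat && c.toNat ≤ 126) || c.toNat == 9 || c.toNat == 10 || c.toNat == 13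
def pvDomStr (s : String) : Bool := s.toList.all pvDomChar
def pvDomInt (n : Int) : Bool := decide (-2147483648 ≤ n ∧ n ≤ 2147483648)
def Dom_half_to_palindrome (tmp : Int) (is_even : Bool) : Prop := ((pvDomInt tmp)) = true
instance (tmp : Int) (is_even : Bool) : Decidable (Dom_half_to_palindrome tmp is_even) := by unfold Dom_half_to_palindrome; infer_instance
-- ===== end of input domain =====

-- B replaces A's accumulator while-loop by a bottom-up recursion returning (reversed-digit value, 10^digits),
-- combined once by tmp*p + r; an alternative decomposition of the same O(digits) cost.


-- ===== PORT A =====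
-- the 'while tmp > 0' loop of A, with its two state variables
def pyWhileA (rev : Int) (tmp : Int) : Int :=
  if h : 0 < tmp then
    pyWhileA (rev * 10 + PySem.Int.mod tmp 10) (PySem.Int.floordiv tmp 10)
  else rev
termination_by tmp.toNat
decreasing_by
  have h10 : (0:Int) < 10 := by norm_num
  rw [PySem.Int.floordiv_eq_ediv_of_pos h10]
  omega

def half_to_palindrome (tmp : Int) (is_even : Bool) : Int :=
  let tmp' := if !is_even then PySem.Int.floordiv tmp 10 else tmp
  pyWhileA tmp tmp'

-- ===== PORT B =====
-- returns (value of t's digits reversed, 10 ^ number_of_digits t); (0, 1) for t ≤ 0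
def mirrorB (t : Int) : Int × Int :=
  if h : t ≤ 0 then (0, 1)
  else
    let rp := mirrorB (PySem.Int.floordiv t 10)
    (rp.1 + PySem.Int.mod t 10 * rp.2, 10 * rp.2)
termination_by t.toNat
decreasing_by
  have h10 : (0:Int) < 10 := by norm_num
  rw [PySem.Int.floordiv_eq_ediv_of_pos h10]
  omega

def half_to_palindrome_alt (tmp : Int) (is_even : Bool) : Int :=
  let t := if is_even then tmp else PySem.Int.floordiv tmp 10
  let rp := mirrorB t
  tmp * rp.2 + rp.1

-- ===== PRECONDITION & SPEC =====
def Spec_half_to_palindrome (tmp : Int) (is_even : Bool) (out : Int) : Prop := out = half_to_palindrome_alt tmp is_even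
instance (tmp : Int) (is_even : Bool) (out : Int) : Decidable (Spec_half_to_palindrome tmp is_even out) := by unfold Spec_half_to_palindrome; infer_instance

-- ===== CLAIM (what is proved, stated in full; the proofs are below) =====
def Claim_equal_half_to_palindrome : Prop := ∀ (tmp : Int) (is_even : Bool), Dom_half_to_palindrome tmp is_even → Spec_half_to_palindrome tmp is_even (half_to_palindrome tmp is_even)

-- ===== LEMMAS AND PROOFS =====

-- loop/recursion bridge: A's while-loop equals rev·p + r where (r, p) = mirrorB t
theorem pyWhileA_eq_mirrorB (n : Nat) : ∀ (t rev : Int), t.toNat ≤ n →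
    pyWhileA rev t = rev * (mirrorB t).2 + (mirrorB t).1 := by
  induction n with
  | zero =>
    intro t rev ht
    have hle : t ≤ 0 := by omega
    rw [pyWhileA, mirrorB]
    simp [hle, not_lt.mpr hle]
  | succ n ih =>
    intro t rev ht
    by_cases hle : t ≤ 0
    · rw [pyWhileA, mirrorB]
      simp [hle, not_lt.mpr hle]
    · have hpos : 0 < t := by omega
      have h10 : (0:Int) < 10 := by norm_num
      have hq : PySem.Int.floordiv t 10 = t / 10 := PySem.Int.floordiv_eq_ediv_of_pos h10
      have hrec : (PySem.Int.floordiv t 10).toNat ≤ n := by rw [hq]; omega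
      rw [pyWhileA, dif_pos hpos, mirrorB, dif_neg hle, ih _ _ hrec]
      ring

-- ===== VERDICT (by name: the statement is the Claim_ definition above) =====
theorem half_to_palindrome_spec : Claim_equal_half_to_palindrome := by
  intro tmp is_even _
  unfold Spec_half_to_palindrome half_to_palindrome half_to_palindrome_alt
  cases is_even <;>
    simp only [Bool.not_true, Bool.not_false, if_true] <;>
    exact pyWhileA_eq_mirrorB _ _ tmp le_rfl
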